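-- pv_equiv track=rewrite | github.com/uc-cdis/fence | tests/dbgap_sync/test_user_sync.py | equal_project_access
-- ===== SOURCE A (Python) =====
-- def equal_project_access(d1, d2):
--     """
--     Check whether d1 and d2 are equal regardless of the order of list values.
--
--     Args:
--         d1, d2 (dict): { project1: [permission1, permission2], project2:...}
--
--     Returns:
--         boolean: True if d1 and d2 contain the same set of permissions for
--         each project, False otherwise
--     """
--     try:
--         assert len(d1.keys()) == len(d2.keys())
--         for project, permissions in d1.items():
--             assert project in d2
--             assert sorted(permissions) == sorted(d2[project])
--     except AssertionError:
--         return False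
--     return True
-- ===== SOURCE B (Python) =====
-- def equal_project_access(d1, d2):
--     """Canonicalize each dict to a sorted list of (project, sorted(permissions))
--     items and compare the two canonical lists with one ==; no per-key lookup,
--     membership test or length check remains."""
--     def canon(d):
--         return sorted((k, sorted(v)) for k, v in d.items())
--     return canon(d1) == canon(d2)
-- ===== Notes on version B (the rewrite author's own statement) =====
-- stated objective: alternative
-- what changed: Replaced the per-key hash lookup with length check and early-exit asserts by canonicalization: each dict becomes a sorted list of (project, sorted(permissions)) items and the two canonical lists are compared with a single ==, so no membership test, d2 lookup or key-count check remains.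
import Mathlib
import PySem

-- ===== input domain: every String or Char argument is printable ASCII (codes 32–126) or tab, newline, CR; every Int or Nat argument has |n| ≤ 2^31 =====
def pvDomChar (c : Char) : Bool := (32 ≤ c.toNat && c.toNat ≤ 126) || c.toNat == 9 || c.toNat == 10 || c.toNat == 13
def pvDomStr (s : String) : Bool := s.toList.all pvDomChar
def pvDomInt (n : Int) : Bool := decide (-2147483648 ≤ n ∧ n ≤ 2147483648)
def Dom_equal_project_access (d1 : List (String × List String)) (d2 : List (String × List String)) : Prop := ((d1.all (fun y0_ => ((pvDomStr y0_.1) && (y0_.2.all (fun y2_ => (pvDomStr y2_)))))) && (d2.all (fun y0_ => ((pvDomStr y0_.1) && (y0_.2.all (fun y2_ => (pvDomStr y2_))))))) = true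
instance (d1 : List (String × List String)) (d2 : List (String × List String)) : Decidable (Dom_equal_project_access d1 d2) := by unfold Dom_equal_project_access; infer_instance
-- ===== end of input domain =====

-- B canonicalizes each dict into a sorted list of (project, sorted permissions) items and
-- compares the two canonical lists once, instead of A's per-key lookup with a length check.

-- ===== PORT A =====
-- A: len(d1.keys()) == len(d2.keys()); then for each (project, permissions) of d1,
-- project must be a key of d2 and sorted(permissions) == sorted(d2[project]); any failed assert returns False.
def equal_project_access (d1 : List (String × List String)) (d2 : List (String × List String)) : Bool :=
  if d1.length == d2.length then
    d1.all (fun pv =>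
      match List.lookup pv.1 d2 with
      | none => false                    -- `assert project in d2` fails
      | some perms2 =>                   -- `sorted(permissions) == sorted(d2[project])`
          PySem.List.sorted pv.2 (fun x => x) false == PySem.List.sorted perms2 (fun x => x) false)
  else false

-- ===== PORT B =====
-- canon(d) = sorted((k, sorted(v)) for k, v in d.items()).  Exact on dicts (Pre_): the
-- project keys of one dict are pairwise distinct strings, so Python's lexicographic tuple
-- sort never consults the second component and coincides with a stable sort by the key string.
def pvCanon (d : List (String × List String)) : List (String × List String) :=
  PySem.List.sorted (d.map (fun kv => (kv.1, PySem.List.sorted kv.2 (fun x => x) false)))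
    (fun p => p.1) false

def equal_project_access_alt (d1 : List (String × List String)) (d2 : List (String × List String)) : Bool :=
  pvCanon d1 == pvCanon d2

-- ===== PRECONDITION & SPEC =====
-- Pre_ excludes association lists with a duplicate key: such a list does not represent a Python
-- dict (building the dict collapses duplicates, keeping the last value), so neither port's
-- behaviour there corresponds to the Python programs, which only ever see genuine dicts.
def Pre_equal_project_access (d1 : List (String × List String)) (d2 : List (String × List String)) : Prop :=
  (d1.map Prod.fst).Nodup ∧ (d2.map Prod.fst).Nodup
instance (d1 : List (String × List String)) (d2 : List (String × List String)) : Decidable (Pre_equal_project_access d1 d2) := by unfold Pre_equal_project_access; infer_instance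

def pvWitness_equal_project_access : (List (String × List String)) × (List (String × List String)) :=
  ([("a", ["r", "w"]), ("b", [])], [("b", []), ("a", ["w", "r"])])

def Spec_equal_project_access (d1 : List (String × List String)) (d2 : List (String × List String)) (out : Bool) : Prop := out = equal_project_access_alt d1 d2
instance (d1 : List (String × List String)) (d2 : List (String × List String)) (out : Bool) : Decidable (Spec_equal_project_access d1 d2 out) := by unfold Spec_equal_project_access; infer_instance

-- ===== CLAIM (what is proved, stated in full; the proofs are below) =====
def Claim_equal_equal_project_access : Prop := ∀ (d1 : List (String × List String)) (d2 : List (String × List String)), Dom_equal_project_access d1 d2 → Pre_equal_project_access d1 d2 → Spec_equal_project_access d1 d2 (equal_project_access d1 d2)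

-- ===== LEMMAS AND PROOFS =====

-- the (as yet unsorted) normalized item list B sorts
def pvNorm (d : List (String × List String)) : List (String × List String) :=
  d.map (fun kv => (kv.1, PySem.List.sorted kv.2 (fun x => x) false))

theorem pvNorm_map_fst (d : List (String × List String)) :
    (pvNorm d).map Prod.fst = d.map Prod.fst := by
  simp [pvNorm]

-- looking a key up in the normalized list = normalizing the result of looking it up
theorem lookup_pvNorm (k : String) (d : List (String × List String)) :
    List.lookup k (pvNorm d)
      = (List.lookup k d).map (fun v => PySem.List.sorted v (fun x => x) false) := by
  induction d with
  | nil => rfl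
  | cons kv rest ih =>
      obtain ⟨k1, v1⟩ := kv
      by_cases h : k == k1
      · simp [pvNorm, List.lookup, h]
      · simp only [pvNorm, List.map_cons, List.lookup, h]
        exact ih

-- in an association list with pairwise-distinct keys, lookup finds any member
theorem lookup_of_mem_nodup {b : List (String × List String)} (hnd : (b.map Prod.fst).Nodup)
    {k : String} {v : List String} (hm : (k, v) ∈ b) : List.lookup k b = some v := by
  induction b with
  | nil => cases hm
  | cons kv rest ih =>
      obtain ⟨k1, v1⟩ := kv
      simp only [List.map_cons, List.nodup_cons] at hnd
      rcases List.mem_cons.mp hm with h | h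
      · obtain ⟨rfl, rfl⟩ := Prod.mk.injEq .. ▸ h
        simp [List.lookup]
      · have hk : ¬ (k == k1) = true := by
          intro hb
          exact hnd.1 (beq_iff_eq.mp hb ▸ List.mem_map_of_mem (f := Prod.fst) h)
        simp only [List.lookup, hk]
        exact ih hnd.2 h

-- A's loop body, characterized: A returns true iff the normalized item lists are permutations
theorem equal_project_access_iff_perm (d1 d2 : List (String × List String))
    (h1 : (d1.map Prod.fst).Nodup) (h2 : (d2.map Prod.fst).Nodup) :
    equal_project_access d1 d2 = true ↔ (pvNorm d1).Perm (pvNorm d2) := by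
  have hn1 : (pvNorm d1).Nodup :=
    List.Nodup.of_map Prod.fst (by rw [pvNorm_map_fst]; exact h1)
  constructor
  · intro h
    unfold equal_project_access at h
    split at h
    case isFalse => cases h
    case isTrue hlen =>
      have hlen' : (pvNorm d2).length ≤ (pvNorm d1).length := by
        have : d1.length = d2.length := beq_iff_eq.mp hlen
        simp [pvNorm, this]
      have hsub : pvNorm d1 ⊆ pvNorm d2 := by
        intro kv hkv
        obtain ⟨pv, hpv, rfl⟩ := List.mem_map.mp hkv
        have := List.all_eq_true.mp h pv hpv
        cases hl : List.lookup pv.1 d2 with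
        | none => rw [hl] at this; cases this
        | some w =>
            rw [hl] at this
            have hw : (pv.1, w) ∈ d2 := by
              obtain ⟨l₁, l₂, hsplit, -⟩ := List.lookup_eq_some_iff.mp hl
              rw [hsplit]; exact List.mem_append.mpr (Or.inr (List.mem_cons_self ..))
            have heq : PySem.List.sorted pv.2 (fun x => x) false
                = PySem.List.sorted w (fun x => x) false := beq_iff_eq.mp this
            have : ((pv.1, w).1, PySem.List.sorted (pv.1, w).2 (fun x => x) false) ∈ pvNorm d2 :=
              List.mem_map_of_mem hw
            simpa [heq] using this
      exact (List.subperm_of_subset hn1 hsub).perm_of_length_le hlen'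
  · intro hperm
    unfold equal_project_access
    have hlen : d1.length = d2.length := by
      have := hperm.length_eq; simpa [pvNorm] using this
    rw [if_pos (beq_iff_eq.mpr hlen)]
    refine List.all_eq_true.mpr (fun pv hpv => ?_)
    have hmem : (pv.1, PySem.List.sorted pv.2 (fun x => x) false) ∈ pvNorm d2 :=
      hperm.subset (List.mem_map_of_mem hpv)
    have hnd2 : ((pvNorm d2).map Prod.fst).Nodup := by rw [pvNorm_map_fst]; exact h2
    have hl := lookup_of_mem_nodup hnd2 hmem
    rw [lookup_pvNorm] at hl
    cases hl2 : List.lookup pv.1 d2 with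
    | none => rw [hl2] at hl; cases hl
    | some w =>
        rw [hl2] at hl
        simp only [Option.map_some, Option.some.injEq] at hl
        simpa using hl.symm

-- B, characterized the same way: the sorted canonical lists agree iff the item lists are permutations
theorem pvCanon_eq_iff_perm (d1 d2 : List (String × List String))
    (h1 : (d1.map Prod.fst).Nodup) :
    pvCanon d1 = pvCanon d2 ↔ (pvNorm d1).Perm (pvNorm d2) := by
  constructor
  · intro h
    have p1 : (pvNorm d1).Perm (pvCanon d1) := (PySem.List.sorted_perm ..).symm
    have p2 : (pvCanon d2).Perm (pvNorm d2) := PySem.List.sorted_perm ..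
    rw [h] at p1
    exact p1.trans p2
  · intro hperm
    have hys : (pvCanon d1).Perm (pvNorm d2) :=
      ((PySem.List.sorted_perm ..).trans hperm : (pvCanon d1).Perm (pvNorm d2))
    have hle : (pvCanon d1).Pairwise (fun a b : String × List String => a.1 ≤ b.1) :=
      PySem.List.sorted_pairwise ..
    have hnd : ((pvCanon d1).map Prod.fst).Nodup := by
      have : ((pvCanon d1).map Prod.fst).Perm ((pvNorm d1).map Prod.fst) :=
        (PySem.List.sorted_perm ..).map Prod.fst
      exact (this.nodup_iff).mpr (pvNorm_map_fst d1 ▸ h1)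
    have hne : (pvCanon d1).Pairwise (fun a b : String × List String => a.1 ≠ b.1) :=
      List.pairwise_map.mp hnd
    have hlt : (pvCanon d1).Pairwise (fun a b : String × List String => a.1 < b.1) :=
      (hle.and hne).imp (fun h => lt_of_le_of_ne h.1 h.2)
    exact (show pvCanon d2 = pvCanon d1 from
      PySem.List.sorted_eq_of_perm_of_pairwise_lt _ _ _ hys hlt).symm

-- ===== VERDICT (by name: the statement is the Claim_ definition above) =====
theorem equal_project_access_spec : Claim_equal_equal_project_access := by
  intro d1 d2 _hdom hpre
  show equal_project_access d1 d2 = equal_project_access_alt d1 d2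
  obtain ⟨h1, h2⟩ := hpre
  have hA := equal_project_access_iff_perm d1 d2 h1 h2
  have hB := pvCanon_eq_iff_perm d1 d2 h1
  rcases hb : equal_project_access d1 d2 with _ | _
  · rcases hb' : equal_project_access_alt d1 d2 with _ | _
    · rfl
    · exfalso
      have : pvCanon d1 = pvCanon d2 := by
        simpa [equal_project_access_alt] using hb'
      rw [hb] at hA
      exact (Bool.false_ne_true) (hA.mpr (hB.mp this))
  · rw [hb] at hA
    have : pvCanon d1 = pvCanon d2 := hB.mpr (hA.mp rfl)
    simp [equal_project_access_alt, this]
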